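/-
  THE FIXED jsmn_parse ON THE MODEL, MACHINE LEVEL, ANY CALLER — **the statement the fix is for** (the form of Prog/Jsmn/Theorem.lean
  `jsmn_parse_correct_v3_of`, WITHOUT the hypothesis `Inv`): about

      X86.run (Dec.decoder μ (Dec.mkTable X86.allRows)) m k      the model's decoder, any processor μ with MicroOK μ,
      User.Abs n m v0                                             the machine `m` is in the user relation with the user state `v0` (layout `n`:
                                                                  `n.pages` 2 MB pages identity-mapped, privilege level `n.cpl` ∈ {0, 3})

    jsmn_parse_fixed_correct_v3_of   from the entry of the fixed jsmn_parse(parser, js, len, tokens, num_tokens), FOR ANY CONTENT OF THE PARSER STRUCT AND OF THE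
                                     TOKEN ARRAY (of num_tokens entries; or tokens == NULL): the run RETURNS (it terminates), with eax = r, the parser
                                     struct = p', the token array = toks', where (r, p', toks') is what the pure model `Jsmn.parseFixed` answers — it always
                                     answers: `Jsmn.parseFixed_total` —, the callee-saved registers restored, and NOTHING WRITTEN outside the function's
                                     stack window, the parser struct and the token array (`ScanPost` / `CallPost`).
                                     What is still assumed is the LAYOUT (`ScanPre`): where the three buffers are, that they do not overlap each other, the
                                     image or the stack, and that the array really has num_tokens entries — none of which C code can check.
    jsmn_parse_fixed_correct_D / _S  the same, closed, for fixed/jsmn_d.bin and fixed/jsmn_s.bin (Fixed/D/Closed.lean, Fixed/S/Closed.lean).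
    jsmn_main_fixed_correct_v3_of    jsmn_main of a fixed image, likewise from `MainSpecFixed`.
-/
import Prog.Jsmn.Fixed.RunSpecs

namespace X86
namespace J6
open X86.User (CodeAt RegsKept Span FlagsOK Layout toNat_add_ofNat toNat_ofNat_lt' add_ofNat_add)
open Jsmn

set_option linter.unusedVariables false

/-- **The fixed jsmn_parse terminates with `parseFixed`'s answer, on the machine, whatever the parser struct and the token array contain**
(from the contract `ParseSpecFixed b n`, by `Reach.sound`). -/
theorem jsmn_parse_fixed_correct_v3_of {b : Bin} {n : User.Layout} (hspec : ParseSpecFixed b n) (μ : Microarch) (hμ : MicroOK μ) (m : Machine)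
    (v0 : User.State) (ha : User.Abs n m v0) (ret pa jsA tb : Word) (js : List UInt8) (numTokens : Nat) (p : Parser) (toks : Option Tokens)
    (hp : ScanPre b n b.parse b.useParse v0 ret pa jsA tb js numTokens p toks)
    (hr8 : Word.low .w32 (v0.reg .r8) = UInt64.ofNat numTokens) :
    ∃ (r : Int) (p' : Parser) (toks' : Option Tokens), parseFixed b.cfg js p toks numTokens = some (r, p', toks') ∧
      ∃ k m' v', _root_.X86.run (Dec.decoder μ (Dec.mkTable X86.allRows)) m k = .next m' ∧ User.Abs n m' v' ∧
        ScanPost b b.useParse v0 ret pa tb numTokens toks r p' toks' v' ∧ m'.sysPart = m.sysPart := by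
  obtain ⟨⟨r, p', toks'⟩, hmodel⟩ := parseFixed_total b.cfg js p toks numTokens (typed_of hp.parser hp.nlt) (toksArg_len hp.toksArg)
  obtain ⟨k, m', v', h1, h2, h3, h4⟩ := (hspec v0 ret pa jsA tb js numTokens p toks r p' toks' hp hr8 hmodel).sound μ hμ m ha
  exact ⟨r, p', toks', hmodel, k, m', v', h1, h2, h3, h4⟩

/-- **jsmn_main of a fixed image leaves the model's answer, encoded, in the output buffer, on the machine** (from `MainSpecFixed b n`). -/
theorem jsmn_main_fixed_correct_v3_of {b : Bin} {n : User.Layout} (hspec : MainSpecFixed b n) (μ : Microarch) (hμ : MicroOK μ) (m : Machine)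
    (v0 : User.State) (ha : User.Abs n m v0) (ret jsA out : Word) (js : List UInt8) (numTokens : Nat) (ts : Tokens)
    (r : Int) (p' : Parser) (ts' : Tokens)
    (hp : MainPreFixed b n v0 ret jsA out js numTokens ts)
    (hmodel : parseFixed b.cfg js Parser.init (some ts) numTokens = some (r, p', some ts')) (hr : 0 ≤ r → r ≤ numTokens) :
    ∃ k m' v', _root_.X86.run (Dec.decoder μ (Dec.mkTable X86.allRows)) m k = .next m' ∧ User.Abs n m' v' ∧
      (CallPost v0 b.useMain [(out.toNat, out.toNat + (4 + b.cfg.tokSize * numTokens))] ret v' ∧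
        v'.reg .rax = UInt64.ofNat (encodeResult b.cfg r ts').length ∧ CodeAt v'.mem out (encodeResult b.cfg r ts')) ∧
      m'.sysPart = m.sysPart := by
  obtain ⟨k, m', v', h1, h2, h3, h4⟩ := (hspec v0 ret jsA out js numTokens ts r p' ts' hp hmodel hr).sound μ hμ m ha
  exact ⟨k, m', v', h1, h2, h3, h4⟩

end J6
end X86

#print axioms X86.J6.jsmn_parse_fixed_correct_v3_of
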